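-- pv_equiv track=rewrite | github.com/MalwareDot/host-sniper | host_sniper/utils/validators.py | is_valid_filename
-- ===== SOURCE A (Python) =====
-- def is_valid_filename(filename):
--     """Validate filename for security"""
--     if not filename or not isinstance(filename, str):
--         return False
--     filename = filename.strip()
--
--     # Check for dangerous characters
--     dangerous_chars = ['<', '>', ':', '"', '|', '?', '*']
--     if any(char in filename for char in dangerous_chars):
--         return False
--
--     # Check for path traversal
--     if '..' in filename or filename.startswith('/') or filename.startswith('\\'):
--         return False
--
--     # Check length
--     if len(filename) > 255:
--         return False
--
--     return bool(filename)
-- ===== SOURCE B (Python) =====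
-- def is_valid_filename(filename):
--     """Validate filename for security (single-pass rewrite)."""
--     if not filename or not isinstance(filename, str):
--         return False
--     s = filename.strip()
--     if not (1 <= len(s) <= 255):
--         return False
--     if s[0] in '/\\':
--         return False
--     prev = ''
--     for ch in s:
--         if ch in '<>:"|?*':
--             return False
--         if ch == '.' and prev == '.':
--             return False
--         prev = ch
--     return True
-- ===== Notes on version B (the rewrite author's own statement) =====
-- stated objective: alternative
-- what changed: Replaces A's multiple whole-string scans (one substring search per dangerous character, plus a double-dot search, two startswith calls and a length check) by one length/first-character guard and a single left-to-right pass over the stripped string that tracks the previous character to detect consecutive dots.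
import Mathlib
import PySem

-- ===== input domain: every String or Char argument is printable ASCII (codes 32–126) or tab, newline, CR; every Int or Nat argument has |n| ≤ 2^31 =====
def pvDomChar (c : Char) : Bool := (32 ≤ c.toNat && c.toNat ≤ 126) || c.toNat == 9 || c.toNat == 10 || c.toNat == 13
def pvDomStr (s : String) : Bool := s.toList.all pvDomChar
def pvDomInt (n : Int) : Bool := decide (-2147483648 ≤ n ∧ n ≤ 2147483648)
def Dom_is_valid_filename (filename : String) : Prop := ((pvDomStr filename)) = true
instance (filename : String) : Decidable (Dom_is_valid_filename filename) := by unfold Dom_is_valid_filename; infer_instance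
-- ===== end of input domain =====

-- B replaces A's repeated whole-string scans by one single left-to-right pass tracking the previous character (objective: alternative).

-- ===== PORT A =====
def is_valid_filename (filename : String) : Bool :=
  if filename = "" then false
  else
    let f := PySem.Str.strip filename
    if (["<", ">", ":", "\"", "|", "?", "*"].any (fun ch => PySem.Str.isIn ch f)) then false
    else if PySem.Str.isIn ".." f || PySem.Str.startswith f "/" || PySem.Str.startswith f "\\" then false
    else if 255 < PySem.Str.len f then false
    else decide (f ≠ "")

-- ===== PORT B =====
-- the single pass of Source B: dangerous-character check plus adjacent-dots check; prev = previous char (none = Python's initial '')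
def pvScan : List Char → Option Char → Bool
  | [], _ => true
  | c :: rest, prev =>
    if c ∈ ['<', '>', ':', '"', '|', '?', '*'] then false
    else if c = '.' ∧ prev = some '.' then false
    else pvScan rest (some c)

def is_valid_filename_alt (filename : String) : Bool :=
  if filename = "" then false
  else
    let cs := (PySem.Str.strip filename).toList
    if ¬ (1 ≤ cs.length ∧ cs.length ≤ 255) then false
    else if cs.head? = some '/' ∨ cs.head? = some '\\' then false
    else pvScan cs none

-- ===== PRECONDITION & SPEC =====
def Spec_is_valid_filename (filename : String) (out : Bool) : Prop := out = is_valid_filename_alt filename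
instance (filename : String) (out : Bool) : Decidable (Spec_is_valid_filename filename out) := by unfold Spec_is_valid_filename; infer_instance

-- ===== CLAIM (what is proved, stated in full; the proofs are below) =====
def Claim_equal_is_valid_filename : Prop := ∀ (filename : String), Dom_is_valid_filename filename → Spec_is_valid_filename filename (is_valid_filename filename)

-- ===== LEMMAS AND PROOFS =====

-- adjacent-dots flag as seen from an arbitrary previous character (proof-side characterisation of pvScan)
def pvDD : List Char → Option Char → Bool
  | [], _ => false
  | c :: rest, prev => (prev = some '.' && c = '.') || pvDD rest (some c)

theorem pvScan_eq (cs : List Char) (prev : Option Char) :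
    pvScan cs prev = (cs.all (fun c => !(c ∈ ['<', '>', ':', '"', '|', '?', '*'])) && !(pvDD cs prev)) := by
  induction cs generalizing prev with
  | nil => rfl
  | cons c rest ih =>
    simp only [pvScan, pvDD, List.all_cons, ih]
    by_cases h1 : c ∈ ['<', '>', ':', '"', '|', '?', '*'] <;>
      by_cases h2 : c = '.' ∧ prev = some '.' <;>
        (simp_all [Bool.and_left_comm, Bool.and_comm, Bool.or_comm]; try ac_rfl)

theorem pvDD_some (cs : List Char) (p : Char) :
    pvDD cs (some p) = ((decide (p = '.') && decide (cs.head? = some '.')) || pvDD cs none) := by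
  cases cs with
  | nil => simp [pvDD]
  | cons c rest => by_cases hp : p = '.' <;> by_cases hc : c = '.' <;> simp_all [pvDD]

theorem pvHead_prefix (rest : List Char) (c : Char) : [c] <+: rest ↔ rest.head? = some c := by
  cases rest <;> simp [eq_comm]

theorem pvDD_none_iff (cs : List Char) : pvDD cs none = true ↔ ['.', '.'] <:+: cs := by
  induction cs with
  | nil => simp [pvDD]
  | cons c rest ih =>
    rw [List.infix_cons_iff]
    have : pvDD (c :: rest) none = pvDD rest (some c) := by simp [pvDD]
    rw [this, pvDD_some]
    constructor
    · intro h
      rcases Bool.or_eq_true_iff.mp h with h | h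
      · left
        rcases Bool.and_eq_true_iff.mp h with ⟨h1, h2⟩
        have h1 := of_decide_eq_true h1
        have h2 := of_decide_eq_true h2
        subst h1
        exact List.cons_prefix_cons.mpr ⟨rfl, (pvHead_prefix rest '.').mpr h2⟩
      · right; exact ih.mp h
    · rintro (h | h)
      · rcases List.cons_prefix_cons.mp h with ⟨h1, h2⟩
        apply Bool.or_eq_true_iff.mpr; left
        apply Bool.and_eq_true_iff.mpr
        refine ⟨by simp [h1.symm], by simp [(pvHead_prefix rest '.').mp h2]⟩
      · exact Bool.or_eq_true_iff.mpr (Or.inr (ih.mpr h))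

theorem pvStartswith_head (f p : String) (c : Char) (h : p.toList = [c]) :
    PySem.Str.startswith f p = decide (f.toList.head? = some c) := by
  rw [Bool.eq_iff_iff, PySem.Str.startswith_eq, decide_eq_true_iff, PySem.Chars.startswith_iff, h]
  exact pvHead_prefix f.toList c

theorem pvIsIn_singleton (f sub : String) (c : Char) (h : sub.toList = [c]) :
    PySem.Str.isIn sub f = f.toList.contains c := by
  rw [Bool.eq_iff_iff, PySem.Str.isIn_iff_infix, h]
  simp [List.singleton_infix_iff]

-- ===== VERDICT (by name: the statement is the Claim_ definition above) =====
set_option maxHeartbeats 800000 in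
theorem is_valid_filename_spec : Claim_equal_is_valid_filename := by
  intro filename _
  unfold Spec_is_valid_filename is_valid_filename is_valid_filename_alt
  by_cases h0 : filename = ""
  · simp [h0]
  · simp only [if_neg h0]
    set f := PySem.Str.strip filename with hf
    set cs := f.toList with hcs
    clear_value f cs
    rw [pvScan_eq]
    simp only [List.any_cons, List.any_nil]
    simp only [pvIsIn_singleton f "<" '<' (by decide), pvIsIn_singleton f ">" '>' (by decide),
      pvIsIn_singleton f ":" ':' (by decide), pvIsIn_singleton f "\"" '"' (by decide),
      pvIsIn_singleton f "|" '|' (by decide), pvIsIn_singleton f "?" '?' (by decide),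
      pvIsIn_singleton f "*" '*' (by decide),
      pvStartswith_head f "/" '/' (by decide), pvStartswith_head f "\\" '\\' (by decide)]
    simp only [← hcs]
    have hdd : PySem.Str.isIn ".." f = pvDD cs none := by
      rw [Bool.eq_iff_iff, PySem.Str.isIn_iff_infix, pvDD_none_iff, ← hcs]
      have : ("..").toList = ['.', '.'] := by decide
      rw [this]
    have hne : (decide (f ≠ "")) = decide (cs ≠ []) := by
      simp [hcs, String.toList_eq_nil_iff]
    have hlen : PySem.Str.len f = (cs.length : Int) := by
      simp [hcs]
    simp only [hdd, hne, hlen]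
    have hall : (cs.all fun c => !decide (c ∈ (['<', '>', ':', '"', '|', '?', '*'] : List Char))) =
        (!(cs.contains '<' || (cs.contains '>' || (cs.contains ':' || (cs.contains '"' || (cs.contains '|' || (cs.contains '?' || (cs.contains '*' || false)))))))) := by
      rw [Bool.eq_iff_iff]
      simp [List.all_eq_true, List.contains_eq_mem]
      constructor
      · intro h
        refine ⟨?_, ?_, ?_, ?_, ?_, ?_, ?_⟩ <;> intro hc <;> simpa using h _ hc
      · rintro ⟨a1, a2, a3, a4, a5, a6, a7⟩ c hc
        refine ⟨?_, ?_, ?_, ?_, ?_, ?_, ?_⟩ <;> rintro rfl <;> tauto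
    rw [hall]
    by_cases hE : cs = []
    · simp [hE, pvDD]
    · by_cases hL : cs.length ≤ 255
      · have h1 : 0 < cs.length := by cases cs with | nil => exact absurd rfl hE | cons a t => simp
        rw [if_neg (not_not_intro ⟨by omega, hL⟩)]
        rw [if_neg (show ¬ (255 < (cs.length : Int)) by omega)]
        rw [show decide (cs ≠ []) = true by simp [hE]]
        by_cases hC1 : (cs.contains '<' || (cs.contains '>' || (cs.contains ':' || (cs.contains '"' || (cs.contains '|' || (cs.contains '?' || (cs.contains '*' || false))))))) = true
        · rw [if_pos hC1, hC1]
          split <;> simp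
        · have hC1' : (cs.contains '<' || (cs.contains '>' || (cs.contains ':' || (cs.contains '"' || (cs.contains '|' || (cs.contains '?' || (cs.contains '*' || false))))))) = false := by
            simpa using hC1
          rw [if_neg hC1, hC1']
          by_cases hS : cs.head? = some '/' ∨ cs.head? = some '\\'
          · rw [if_pos hS]
            rw [if_pos (show (pvDD cs none || decide (cs.head? = some '/') || decide (cs.head? = some '\\')) = true from by
              rcases hS with h | h <;> simp [h])]
          · rw [if_neg hS]
            rw [not_or] at hS
            by_cases hD : pvDD cs none = true
            · rw [if_pos (show (pvDD cs none || decide (cs.head? = some '/') || decide (cs.head? = some '\\')) = true from by simp [hD])]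
              simp [hD]
            · have hDf : pvDD cs none = false := by simpa using hD
              rw [if_neg (show ¬ (pvDD cs none || decide (cs.head? = some '/') || decide (cs.head? = some '\\')) = true from by
                simp [hDf, hS.1, hS.2])]
              simp [hDf]
      · rw [if_pos (show ¬ (1 ≤ cs.length ∧ cs.length ≤ 255) from by omega)]
        rw [if_pos (show (255 : Int) < (cs.length : Int) from by omega)]
        simp
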